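-- pv_equiv track=rewrite | github.com/davidspivak2/cue | app/ass_karaoke.py | split_text_into_word_parts
-- ===== SOURCE A (Python) =====
-- from typing import Iterable, Optional, Sequence
--
-- def _tokenize_word_tokens(text: str) -> list[tuple[str, bool]]:
--     tokens: list[tuple[str, bool]] = []
--     if not text:
--         return tokens
--     current: list[str] = []
--     current_is_word: Optional[bool] = None
--     for char in text:
--         is_word = char.isalnum()
--         if current_is_word is None:
--             current_is_word = is_word
--             current.append(char)
--             continue
--         if is_word == current_is_word:
--             current.append(char)
--         else:
--             tokens.append(("".join(current), current_is_word))
--             current = [char]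
--             current_is_word = is_word
--     if current:
--         tokens.append(("".join(current), current_is_word if current_is_word is not None else False))
--     return tokens
--
-- def split_text_into_word_parts(cue_text: str) -> tuple[str, list[str]]:
--     tokens = _tokenize_word_tokens(cue_text)
--     if not tokens:
--         return "", []
--     prefix_parts: list[str] = []
--     word_parts: list[str] = []
--     idx = 0
--     while idx < len(tokens) and not tokens[idx][1]:
--         prefix_parts.append(tokens[idx][0])
--         idx += 1
--     prefix = "".join(prefix_parts)
--     while idx < len(tokens):
--         token_text, is_word = tokens[idx]
--         if not is_word:
--             idx += 1
--             continue
--         part = [token_text]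
--         idx += 1
--         while idx < len(tokens) and not tokens[idx][1]:
--             part.append(tokens[idx][0])
--             idx += 1
--         word_parts.append("".join(part))
--     return prefix, word_parts
-- ===== SOURCE B (Python) =====
-- def split_text_into_word_parts(cue_text: str) -> tuple[str, list[str]]:
--     prefix_chars: list[str] = []
--     word_parts: list[str] = []
--     current: list[str] | None = None
--     prev_is_word = False
--     for char in cue_text:
--         is_word = char.isalnum()
--         if is_word and not prev_is_word:
--             if current is not None:
--                 word_parts.append("".join(current))
--             current = [char]
--         elif current is None:
--             prefix_chars.append(char)
--         else:
--             current.append(char)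
--         prev_is_word = is_word
--     if current is not None:
--         word_parts.append("".join(current))
--     return "".join(prefix_chars), word_parts
-- ===== Notes on version B (the rewrite author's own statement) =====
-- stated objective: simpler
-- what changed: B drops the tokenizer helper and the intermediate (text, is_word) token table entirely: instead of tokenizing into runs and then regrouping tokens with three index-driven while loops, it makes a single character pass with a prev_is_word flag, starting a new word part at each non-word-to-word boundary.
import Mathlib
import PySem

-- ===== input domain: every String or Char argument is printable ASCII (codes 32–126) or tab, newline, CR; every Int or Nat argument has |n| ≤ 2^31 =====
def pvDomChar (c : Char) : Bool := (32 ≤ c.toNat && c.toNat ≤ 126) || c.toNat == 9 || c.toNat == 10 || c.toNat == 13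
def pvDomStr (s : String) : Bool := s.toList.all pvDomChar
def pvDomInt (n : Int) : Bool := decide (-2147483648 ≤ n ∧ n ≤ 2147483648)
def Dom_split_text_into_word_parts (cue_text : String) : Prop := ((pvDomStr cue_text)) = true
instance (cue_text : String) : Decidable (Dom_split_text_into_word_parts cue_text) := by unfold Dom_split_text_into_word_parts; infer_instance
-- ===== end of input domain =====

-- B replaces A's two-pass design (tokenize into runs, then regroup tokens with index loops)
-- by a single char-level pass with a prev_is_word flag; objective: simpler (same O(n) cost).
-- Token/part texts are carried as List Char and joined to String at the edges (exact for str).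

-- ===== PORT A =====
-- char.isalnum()
def pvIsW (c : Char) : Bool := PySem.Chars.isalnum c

-- the body of the for-loop in _tokenize_word_tokens; state = (tokens, current, current_is_word)
def pvTokStep (st : List (List Char × Bool) × List Char × Option Bool) (c : Char) :
    List (List Char × Bool) × List Char × Option Bool :=
  match st with
  | (tokens, current, cw) =>
    let isw := pvIsW c
    match cw with
    | none => (tokens, current ++ [c], some isw)
    | some b => if isw == b then (tokens, current ++ [c], some b)
                else (tokens ++ [(current, b)], [c], some isw)

-- _tokenize_word_tokens
def pvTokenize (text : List Char) : List (List Char × Bool) :=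
  if text = [] then []
  else
    match text.foldl pvTokStep ([], [], none) with
    | (tokens, current, cw) =>
      if current ≠ [] then tokens ++ [(current, cw.getD false)] else tokens

-- the `while idx < len(tokens) and not tokens[idx][1]` loops (prefix loop and inner
-- separator loop are the same loop): collected texts and the remaining tokens
def pvTakeSeps : List (List Char × Bool) → List (List Char) × List (List Char × Bool)
  | [] => ([], [])
  | (t, b) :: rest =>
    if b then ([], (t, b) :: rest)
    else
      let p := pvTakeSeps rest
      (t :: p.1, p.2)

theorem pvTakeSeps_len (l : List (List Char × Bool)) : (pvTakeSeps l).2.length ≤ l.length := by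
  induction l with
  | nil => simp [pvTakeSeps]
  | cons h rest ih =>
    obtain ⟨t, b⟩ := h
    by_cases hb : b
    · simp [pvTakeSeps, hb]
    · simp [pvTakeSeps, hb]; omega

-- the outer `while idx < len(tokens)` loop of split_text_into_word_parts
def pvWordLoop : List (List Char × Bool) → List (List Char)
  | [] => []
  | (t, b) :: rest =>
    if b then (t :: (pvTakeSeps rest).1).flatten :: pvWordLoop (pvTakeSeps rest).2
    else pvWordLoop rest
termination_by l => l.length
decreasing_by
  · have := pvTakeSeps_len rest; simp; omega
  · simp

def split_text_into_word_parts (cue_text : String) : String × List String :=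
  let tokens := pvTokenize cue_text.toList
  if tokens = [] then ("", [])
  else
    let p := pvTakeSeps tokens
    (String.ofList p.1.flatten, (pvWordLoop p.2).map String.ofList)

-- ===== PORT B =====
-- the body of B's single for-loop; state = (prefix_chars, word_parts, current, prev_is_word)
def pvAltStep (st : List Char × List (List Char) × Option (List Char) × Bool) (c : Char) :
    List Char × List (List Char) × Option (List Char) × Bool :=
  match st with
  | (pfx, parts, cur, prevW) =>
    let isw := pvIsW c
    if isw && !prevW then
      (pfx, parts ++ (match cur with | none => [] | some p => [p]), some [c], isw)
    else
      match cur with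
      | none => (pfx ++ [c], parts, none, isw)
      | some p => (pfx, parts, some (p ++ [c]), isw)

def split_text_into_word_parts_alt (cue_text : String) : String × List String :=
  match cue_text.toList.foldl pvAltStep ([], [], none, false) with
  | (pfx, parts, cur, _) =>
    (String.ofList pfx,
     (parts ++ (match cur with | none => [] | some p => [p])).map String.ofList)

-- ===== PRECONDITION & SPEC =====
def Spec_split_text_into_word_parts (cue_text : String) (out : String × List String) : Prop := out = split_text_into_word_parts_alt cue_text
instance (cue_text : String) (out : String × List String) : Decidable (Spec_split_text_into_word_parts cue_text out) := by unfold Spec_split_text_into_word_parts; infer_instance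

-- ===== CLAIM (what is proved, stated in full; the proofs are below) =====
def Claim_equal_split_text_into_word_parts : Prop := ∀ (cue_text : String), Dom_split_text_into_word_parts cue_text → Spec_split_text_into_word_parts cue_text (split_text_into_word_parts cue_text)

-- ===== LEMMAS AND PROOFS =====

-- the maximal runs of chars of equal "wordness", tagged with that wordness
def pvTokOf : List Char → List (List Char × Bool)
  | [] => []
  | c :: cs =>
    (c :: cs.takeWhile (fun d => pvIsW d == pvIsW c), pvIsW c) ::
      pvTokOf (cs.dropWhile (fun d => pvIsW d == pvIsW c))
termination_by l => l.length
decreasing_by have := List.length_dropWhile_le (l := cs) (p := fun d => pvIsW d == pvIsW c); simp; omega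

-- finishing the tokenizer state
def pvFinA (st : List (List Char × Bool) × List Char × Option Bool) : List (List Char × Bool) :=
  match st with
  | (tokens, current, cw) => if current ≠ [] then tokens ++ [(current, cw.getD false)] else tokens

theorem pvTakeWhile_all_append (p : Char → Bool) (u v : List Char) (hu : ∀ x ∈ u, p x = true) :
    (u ++ v).takeWhile p = u ++ v.takeWhile p := by
  induction u with
  | nil => simp
  | cons a u ih =>
    simp only [List.cons_append, List.takeWhile_cons, hu a (by simp)]
    rw [ih (fun x hx => hu x (by simp [hx]))]
    simp

theorem pvDropWhile_all_append (p : Char → Bool) (u v : List Char) (hu : ∀ x ∈ u, p x = true) :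
    (u ++ v).dropWhile p = v.dropWhile p := by
  induction u with
  | nil => simp
  | cons a u ih =>
    simp only [List.cons_append, List.dropWhile_cons, hu a (by simp)]
    exact ih (fun x hx => hu x (by simp [hx]))

theorem pvTokOf_uniform (cu : List Char) (c : Char) (cs : List Char) (b : Bool)
    (hcu : ∀ x ∈ cu, pvIsW x = b) (hc : pvIsW c ≠ b) :
    pvTokOf (cu ++ c :: cs) = (if cu = [] then [] else [(cu, b)]) ++ pvTokOf (c :: cs) := by
  cases cu with
  | nil => simp
  | cons d du =>
    have hd : pvIsW d = b := hcu d (by simp)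
    rw [if_neg (by simp)]
    show pvTokOf (d :: (du ++ c :: cs)) = _
    rw [pvTokOf]
    have hp : ∀ x ∈ du, (fun e => pvIsW e == pvIsW d) x = true := by
      intro x hx; simp [hcu x (by simp [hx]), hd]
    rw [pvTakeWhile_all_append _ _ _ hp, pvDropWhile_all_append _ _ _ hp]
    rw [List.takeWhile_cons_of_neg (by simp [hd]; exact fun h => hc h),
        List.dropWhile_cons_of_neg (by simp [hd]; exact fun h => hc h)]
    simp [hd]

theorem pvTokOf_all (cu : List Char) (b : Bool) (hne : cu ≠ []) (hcu : ∀ x ∈ cu, pvIsW x = b) :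
    pvTokOf cu = [(cu, b)] := by
  cases cu with
  | nil => exact absurd rfl hne
  | cons d du =>
    have hd : pvIsW d = b := hcu d (by simp)
    rw [pvTokOf]
    have hp : ∀ x ∈ du, (fun e => pvIsW e == pvIsW d) x = true := by
      intro x hx; simp [hcu x (by simp [hx]), hd]
    rw [List.takeWhile_eq_self_iff.mpr hp, List.dropWhile_eq_nil_iff.mpr hp]
    simp [hd, pvTokOf]

theorem pvTokFold (cs : List Char) : ∀ (tk : List (List Char × Bool)) (cu : List Char) (b : Bool),
    cu ≠ [] → (∀ x ∈ cu, pvIsW x = b) →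
    pvFinA (cs.foldl pvTokStep (tk, cu, some b)) = tk ++ pvTokOf (cu ++ cs) := by
  induction cs with
  | nil =>
    intro tk cu b hne hcu
    simp only [List.foldl_nil, pvFinA, List.append_nil, if_pos hne]
    rw [pvTokOf_all cu b hne hcu]
    simp
  | cons c cs ih =>
    intro tk cu b hne hcu
    simp only [List.foldl_cons, pvTokStep]
    by_cases h : pvIsW c = b
    · rw [if_pos (by simp [h])]
      rw [ih tk (cu ++ [c]) b (by simp) (by intro x hx; rcases List.mem_append.mp hx with hx | hx
                                            · exact hcu x hx
                                            · simp at hx; simp [hx, h])]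
      simp
    · rw [if_neg (by simp [h])]
      rw [ih (tk ++ [(cu, b)]) [c] (pvIsW c) (by simp) (by simp)]
      rw [pvTokOf_uniform cu c cs b hcu h, if_neg hne]
      simp

theorem pvTokenize_eq (cs : List Char) : pvTokenize cs = pvTokOf cs := by
  cases cs with
  | nil => simp [pvTokenize, pvTokOf]
  | cons c cs =>
    show pvFinA ((c :: cs).foldl pvTokStep ([], [], none)) = _
    simp only [List.foldl_cons, pvTokStep, List.nil_append]
    rw [pvTokFold cs [] [c] (pvIsW c) (by simp) (by simp)]
    simp

-- B's fold over an all-word run with prev_is_word = true just extends the open part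
theorem pvAltRunTrue (r : List Char) : ∀ (pfx cu : List Char) (parts : List (List Char)),
    (∀ x ∈ r, pvIsW x = true) →
    r.foldl pvAltStep (pfx, parts, some cu, true) = (pfx, parts, some (cu ++ r), true) := by
  induction r with
  | nil => simp
  | cons c r ih =>
    intro pfx cu parts h
    have hc : pvIsW c = true := h c (by simp)
    simp only [List.foldl_cons, pvAltStep, hc]
    rw [if_neg (by simp)]
    rw [ih pfx (cu ++ [c]) parts (fun x hx => h x (by simp [hx]))]
    simp

-- B's fold over an all-separator run with an open part just extends it
theorem pvAltRunFalse (r : List Char) : ∀ (pfx cu : List Char) (parts : List (List Char)) (b : Bool),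
    (∀ x ∈ r, pvIsW x = false) →
    r.foldl pvAltStep (pfx, parts, some cu, b) =
      (pfx, parts, some (cu ++ r), if r.isEmpty then b else false) := by
  induction r with
  | nil => simp
  | cons c r ih =>
    intro pfx cu parts b h
    have hc : pvIsW c = false := h c (by simp)
    simp only [List.foldl_cons, pvAltStep, hc]
    rw [if_neg (by simp)]
    rw [ih pfx (cu ++ [c]) parts false (fun x hx => h x (by simp [hx]))]
    cases r <;> simp

-- B's fold over an all-separator run with no open part extends the prefix
theorem pvAltRunNone (r : List Char) : ∀ (pfx : List Char) (parts : List (List Char)),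
    (∀ x ∈ r, pvIsW x = false) →
    r.foldl pvAltStep (pfx, parts, none, false) = (pfx ++ r, parts, none, false) := by
  induction r with
  | nil => simp
  | cons c r ih =>
    intro pfx parts h
    have hc : pvIsW c = false := h c (by simp)
    simp only [List.foldl_cons, pvAltStep, hc]
    rw [if_neg (by simp)]
    rw [ih (pfx ++ [c]) parts (fun x hx => h x (by simp [hx]))]
    simp

-- grouping at the token level, word phase (open part `cu`, prev wordness `b`)
def pvWGroup (cu : List Char) (b : Bool) : List (List Char × Bool) → List (List Char)
  | [] => [cu]
  | (t, w) :: rest => if w && !b then cu :: pvWGroup t true rest else pvWGroup (cu ++ t) w rest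

-- grouping at the token level, from the initial (prefix) phase
def pvPGroup : List (List Char × Bool) → List Char × List (List Char)
  | [] => ([], [])
  | (t, w) :: rest =>
    if w then ([], pvWGroup t true rest)
    else
      let p := pvPGroup rest
      (t ++ p.1, p.2)

def pvFinB (st : List Char × List (List Char) × Option (List Char) × Bool) :
    List Char × List (List Char) :=
  match st with
  | (pfx, parts, cur, _) => (pfx, parts ++ (match cur with | none => [] | some p => [p]))

theorem pvAltWord (cs : List Char) : ∀ (pfx cu : List Char) (parts : List (List Char)) (b : Bool),
    pvFinB (cs.foldl pvAltStep (pfx, parts, some cu, b)) =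
      (pfx, parts ++ pvWGroup cu b (pvTokOf cs)) := by
  induction cs using pvTokOf.induct with
  | case1 => intro pfx cu parts b; simp [pvFinB, pvWGroup, pvTokOf]
  | case2 c cs ih =>
    intro pfx cu parts b
    set p : Char → Bool := fun d => pvIsW d == pvIsW c with hpdef
    have hsplit : c :: cs = (c :: cs.takeWhile p) ++ cs.dropWhile p := by
      simp [List.takeWhile_append_dropWhile]
    have htw : ∀ x ∈ cs.takeWhile p, pvIsW x = pvIsW c := by
      intro x hx
      have := List.mem_takeWhile_imp hx
      simpa [hpdef] using this
    have htok : pvTokOf (c :: cs) = (c :: cs.takeWhile p, pvIsW c) :: pvTokOf (cs.dropWhile p) := by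
      rw [pvTokOf]
    rw [htok]
    conv_lhs => rw [hsplit]
    rw [List.foldl_append]
    by_cases hw : pvIsW c = true
    · by_cases hb : b = true
      · -- continuing word run with prev_is_word already true: extend the open part
        simp only [List.foldl_cons, pvAltStep, hw, hb]
        rw [if_neg (by simp)]
        rw [pvAltRunTrue _ _ _ _ (by intro x hx; rw [htw x hx, hw])]
        rw [ih pfx (cu ++ [c] ++ cs.takeWhile p) parts true]
        rw [pvWGroup]
        simp
      · -- word char after non-word: flush the open part, start a new one
        have hb' : b = false := by revert hb; cases b <;> simp
        simp only [List.foldl_cons, pvAltStep, hw, hb']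
        rw [if_pos (by simp)]
        rw [pvAltRunTrue _ _ _ _ (by intro x hx; rw [htw x hx, hw])]
        rw [ih pfx ([c] ++ cs.takeWhile p) (parts ++ [cu]) true]
        rw [pvWGroup]
        simp
    · -- non-word run: every char is appended to the open part
      have hw' : pvIsW c = false := by revert hw; cases hcw : pvIsW c <;> simp
      simp only [List.foldl_cons, pvAltStep, hw']
      rw [if_neg (by simp)]
      rw [pvAltRunFalse _ _ _ _ _ (by intro x hx; rw [htw x hx, hw'])]
      rw [ih pfx (cu ++ [c] ++ cs.takeWhile p) parts _]
      rw [pvWGroup]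
      cases hcs : cs.takeWhile p <;> simp

theorem pvAltMain (cs : List Char) : ∀ (pfx : List Char) (parts : List (List Char)),
    pvFinB (cs.foldl pvAltStep (pfx, parts, none, false)) =
      (pfx ++ (pvPGroup (pvTokOf cs)).1, parts ++ (pvPGroup (pvTokOf cs)).2) := by
  induction cs using pvTokOf.induct with
  | case1 => intro pfx parts; simp [pvFinB, pvPGroup, pvTokOf]
  | case2 c cs ih =>
    intro pfx parts
    set p : Char → Bool := fun d => pvIsW d == pvIsW c with hpdef
    have hsplit : c :: cs = (c :: cs.takeWhile p) ++ cs.dropWhile p := by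
      simp [List.takeWhile_append_dropWhile]
    have htw : ∀ x ∈ cs.takeWhile p, pvIsW x = pvIsW c := by
      intro x hx
      have := List.mem_takeWhile_imp hx
      simpa [hpdef] using this
    have htok : pvTokOf (c :: cs) = (c :: cs.takeWhile p, pvIsW c) :: pvTokOf (cs.dropWhile p) := by
      rw [pvTokOf]
    rw [htok]
    conv_lhs => rw [hsplit]
    rw [List.foldl_append]
    by_cases hw : pvIsW c = true
    · -- first word of the text: prefix phase ends, open the first part
      simp only [List.foldl_cons, pvAltStep, hw]
      rw [if_pos (by simp)]
      rw [pvAltRunTrue _ _ _ _ (by intro x hx; rw [htw x hx, hw])]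
      rw [pvAltWord (cs.dropWhile p) pfx ([c] ++ cs.takeWhile p) (parts ++ []) true]
      rw [pvPGroup]
      simp
    · -- leading non-word run: goes to the prefix
      have hw' : pvIsW c = false := by revert hw; cases hcw : pvIsW c <;> simp
      simp only [List.foldl_cons, pvAltStep, hw']
      rw [if_neg (by simp)]
      rw [pvAltRunNone _ _ _ (by intro x hx; rw [htw x hx, hw'])]
      rw [ih (pfx ++ [c] ++ cs.takeWhile p) parts]
      rw [pvPGroup]
      simp

-- alternation: adjacent tokens of pvTokOf have different wordness
def pvAlt (l : List (List Char × Bool)) : Prop := List.IsChain (fun a b => a.2 ≠ b.2) l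

theorem pvDropWhile_head (p : Char → Bool) (l : List Char) (d : Char) (t : List Char)
    (h : l.dropWhile p = d :: t) : p d = false := by
  induction l with
  | nil => simp at h
  | cons a l ih =>
    rw [List.dropWhile_cons] at h
    by_cases ha : p a = true
    · rw [if_pos ha] at h; exact ih h
    · rw [if_neg ha] at h
      cases h; simpa using ha

theorem pvTokOf_alt (cs : List Char) : pvAlt (pvTokOf cs) := by
  induction cs using pvTokOf.induct with
  | case1 => simp [pvAlt, pvTokOf]
  | case2 c cs ih =>
    rw [pvTokOf]
    cases hdw : cs.dropWhile (fun d => pvIsW d == pvIsW c) with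
    | nil => simp [pvAlt, pvTokOf]
    | cons d dt =>
      have hd : pvIsW d ≠ pvIsW c := by
        have := pvDropWhile_head _ _ _ _ hdw
        simpa using this
      rw [pvTokOf]
      refine List.isChain_cons_cons.mpr ⟨by simpa using hd.symm, ?_⟩
      rw [hdw] at ih
      rw [pvTokOf] at ih
      exact ih

-- A's word loop equals token-level word grouping, on alternating token lists
theorem pvWordLoop_eq_aux (n : Nat) : ∀ (rest : List (List Char × Bool)) (t : List Char),
    rest.length ≤ n → pvAlt ((t, true) :: rest) →
    pvWordLoop ((t, true) :: rest) = pvWGroup t true rest := by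
  induction n with
  | zero =>
    intro rest t hlen _
    have : rest = [] := List.eq_nil_of_length_eq_zero (by omega)
    subst this
    simp [pvWordLoop, pvTakeSeps, pvWGroup]
  | succ n ih =>
    intro rest t hlen halt
    cases rest with
    | nil => simp [pvWordLoop, pvTakeSeps, pvWGroup]
    | cons sb rest' =>
      obtain ⟨s, w⟩ := sb
      have hw : w = false := by
        have := (List.isChain_cons_cons.mp halt).1
        revert this; cases w <;> simp
      subst hw
      rw [pvWordLoop, pvTakeSeps]
      rw [if_pos rfl, if_neg (by simp)]
      cases rest' with
      | nil =>
        simp [pvTakeSeps, pvWordLoop, pvWGroup]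
      | cons ub rest'' =>
        obtain ⟨u, wu⟩ := ub
        have hwu : wu = true := by
          have h2 := (List.isChain_cons_cons.mp (List.isChain_cons_cons.mp halt).2).1
          revert h2; cases wu <;> simp
        subst hwu
        rw [pvTakeSeps, if_pos rfl]
        simp only []
        rw [ih rest'' u (by simp at hlen ⊢; omega)
            (by exact (List.isChain_cons_cons.mp (List.isChain_cons_cons.mp halt).2).2)]
        conv_rhs => rw [pvWGroup]
        rw [if_neg (by simp)]
        conv_rhs => rw [pvWGroup]
        simp

-- A's word loop equals token-level word grouping, on alternating token lists
theorem pvWordLoop_eq (rest : List (List Char × Bool)) (t : List Char)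
    (h : pvAlt ((t, true) :: rest)) :
    pvWordLoop ((t, true) :: rest) = pvWGroup t true rest :=
  pvWordLoop_eq_aux rest.length rest t (le_refl _) h

-- A's whole grouping equals token-level grouping, on alternating token lists
theorem pvGroup_eq (tk : List (List Char × Bool)) (h : pvAlt tk) :
    ((pvTakeSeps tk).1.flatten, pvWordLoop (pvTakeSeps tk).2) = pvPGroup tk := by
  induction tk with
  | nil => simp [pvTakeSeps, pvWordLoop, pvPGroup]
  | cons tb rest ih =>
    obtain ⟨t, w⟩ := tb
    cases w with
    | true =>
      rw [pvTakeSeps, if_pos rfl, pvPGroup, if_pos rfl]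
      simp only [List.flatten_nil]
      rw [pvWordLoop_eq rest t h]
    | false =>
      rw [pvTakeSeps, if_neg (by simp), pvPGroup, if_neg (by simp)]
      have ih' := ih (by
        cases rest with
        | nil => simp [pvAlt]
        | cons b l => exact (List.isChain_cons_cons.mp h).2)
      have h1 : (pvTakeSeps rest).1.flatten = (pvPGroup rest).1 := congrArg Prod.fst ih'
      have h2 : pvWordLoop (pvTakeSeps rest).2 = (pvPGroup rest).2 := congrArg Prod.snd ih'
      simp only [List.flatten_cons, h1, h2]

theorem pvTokOf_nil_iff (cs : List Char) : pvTokOf cs = [] ↔ cs = [] := by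
  cases cs with
  | nil => simp [pvTokOf]
  | cons c cs => rw [pvTokOf]; simp

-- ===== VERDICT (by name: the statement is the Claim_ definition above) =====
theorem split_text_into_word_parts_spec : Claim_equal_split_text_into_word_parts := by
  intro s _
  unfold Spec_split_text_into_word_parts split_text_into_word_parts
  rw [pvTokenize_eq]
  by_cases hnil : pvTokOf s.toList = []
  · rw [if_pos hnil]
    have hcs : s.toList = [] := (pvTokOf_nil_iff _).mp hnil
    unfold split_text_into_word_parts_alt
    rw [hcs]
    simp
  · rw [if_neg hnil]
    have hg := pvGroup_eq (pvTokOf s.toList) (pvTokOf_alt s.toList)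
    have h1 : (pvTakeSeps (pvTokOf s.toList)).1.flatten = (pvPGroup (pvTokOf s.toList)).1 :=
      congrArg Prod.fst hg
    have h2 : pvWordLoop (pvTakeSeps (pvTokOf s.toList)).2 = (pvPGroup (pvTokOf s.toList)).2 :=
      congrArg Prod.snd hg
    have hmain := pvAltMain s.toList [] []
    rcases hfold : s.toList.foldl pvAltStep ([], [], none, false) with ⟨pfx, parts, cur, pw⟩
    rw [hfold] at hmain
    simp only [pvFinB, List.nil_append] at hmain
    injection hmain with hm1 hm2
    unfold split_text_into_word_parts_alt
    rw [hfold]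
    simp only [h1, h2, ← hm1, ← hm2]
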